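-- pv_equiv track=rewrite | github.com/austencloud/tka-studio | src/desktop/modern/src/application/services/layout/layout_management_service_original.py | _calculate_flow_layout
-- ===== SOURCE A (Python) =====
-- from typing import Dict, Any, Optional, Tuple, List, Union, TYPE_CHECKING
--
-- def _calculate_flow_layout(
--     components: Dict[str, Any], container_size: Tuple[int, int]
-- ) -> Dict[str, Tuple[int, int]]:
--     """Calculate flow layout for components."""
--     positions = {}
--     current_x = 10
--     current_y = 10
--     row_height = 0
--     container_width = container_size[0]
--
--     for name, config in components.items():
--         width = config.get("width", 100)
--         height = config.get("height", 100)
--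
--         # Check if component fits in current row
--         if current_x + width > container_width - 10:
--             # Move to next row
--             current_x = 10
--             current_y += row_height + 10
--             row_height = 0
--
--         positions[name] = (current_x, current_y)
--         current_x += width + 10
--         row_height = max(row_height, height)
--
--     return positions
-- ===== SOURCE B (Python) =====
-- def _calculate_flow_layout(components, container_size):
--     """Two-pass flow layout: group components into rows, then assign row y-offsets."""
--     container_width = container_size[0]
--
--     # Pass 1: greedy row packing; each row is (items, height), items = [(name, x)].
--     rows = []
--     cur_items, cur_x, cur_h = [], 10, 0
--     for name, config in components.items():
--         width = config.get("width", 100)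
--         height = config.get("height", 100)
--         if cur_x + width > container_width - 10:
--             rows.append((cur_items, cur_h))
--             cur_items, cur_x, cur_h = [], 10, 0
--         cur_items.append((name, cur_x))
--         cur_x += width + 10
--         cur_h = max(cur_h, height)
--     rows.append((cur_items, cur_h))
--
--     # Pass 2: assign y per row.
--     positions = {}
--     y = 10
--     for items, h in rows:
--         for name, x in items:
--             positions[name] = (x, y)
--         y += h + 10
--     return positions
-- ===== Notes on version B (the rewrite author's own statement) =====
-- stated objective: alternative
-- what changed: Replaces A's single fold carrying (x, y, row_height) with a two-pass decomposition: pass 1 greedily packs components into explicit rows recording each member's x and the row's max height; pass 2 walks the rows once assigning the running y, so x- and y-placement are computed independently.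
import Mathlib
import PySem

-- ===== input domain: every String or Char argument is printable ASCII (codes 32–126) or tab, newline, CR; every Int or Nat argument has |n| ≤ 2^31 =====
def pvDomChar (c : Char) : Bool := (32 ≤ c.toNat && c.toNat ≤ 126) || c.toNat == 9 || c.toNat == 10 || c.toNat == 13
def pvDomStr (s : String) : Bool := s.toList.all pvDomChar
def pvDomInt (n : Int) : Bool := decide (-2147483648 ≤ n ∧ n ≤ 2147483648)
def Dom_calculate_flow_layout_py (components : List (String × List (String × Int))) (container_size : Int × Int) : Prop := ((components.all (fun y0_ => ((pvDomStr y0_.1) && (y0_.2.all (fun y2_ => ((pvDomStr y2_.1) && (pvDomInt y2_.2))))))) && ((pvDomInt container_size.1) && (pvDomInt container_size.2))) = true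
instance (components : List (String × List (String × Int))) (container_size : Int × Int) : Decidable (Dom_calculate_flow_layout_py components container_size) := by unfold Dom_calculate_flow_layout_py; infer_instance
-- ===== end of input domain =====

-- B recomputes the same flow layout in two passes (greedy row packing, then a y-assignment walk over the rows)
-- instead of A's single fold carrying (x, y, row_height); alternative decomposition, same cost.


-- ===== PORT A =====
-- A's loop body: state = (positions, current_x, current_y, row_height)
def pvStepA (cw : Int) (s : PySem.Dict String (Int × Int) × Int × Int × Int)
    (nc : String × List (String × Int)) : PySem.Dict String (Int × Int) × Int × Int × Int :=
  let positions := s.1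
  let config := PySem.Dict.ofList nc.2
  let width := config.getD "width" 100
  let height := config.getD "height" 100
  -- "if current_x + width > container_width - 10: current_x = 10; current_y += row_height + 10; row_height = 0"
  let t : Int × Int × Int :=
    if s.2.1 + width > cw - 10 then (10, s.2.2.1 + s.2.2.2 + 10, 0) else s.2
  (positions.insert nc.1 (t.1, t.2.1), t.1 + width + 10, t.2.1, max t.2.2 height)

def calculate_flow_layout_py (components : List (String × List (String × Int))) (container_size : Int × Int) : List (String × Int × Int) :=
  ((PySem.Dict.ofList components).items.foldl (pvStepA container_size.1)
    (PySem.Dict.empty, 10, 10, 0)).1.items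

-- ===== PORT B =====
-- B pass-1 loop body: state = (rows, cur_items, cur_x, cur_h); a row is (items, height)
def pvStepB (cw : Int) (s : List (List (String × Int) × Int) × List (String × Int) × Int × Int)
    (nc : String × List (String × Int)) : List (List (String × Int) × Int) × List (String × Int) × Int × Int :=
  let config := PySem.Dict.ofList nc.2
  let width := config.getD "width" 100
  let height := config.getD "height" 100
  let t : List (List (String × Int) × Int) × List (String × Int) × Int × Int :=
    if s.2.2.1 + width > cw - 10 then (s.1 ++ [(s.2.1, s.2.2.2)], [], 10, 0) else s
  (t.1, t.2.1 ++ [(nc.1, t.2.2.1)], t.2.2.1 + width + 10, max t.2.2.2 height)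

-- B pass-2 loop body: state = (positions, y); emits one row and advances y
def pvEmit (s : PySem.Dict String (Int × Int) × Int) (row : List (String × Int) × Int) :
    PySem.Dict String (Int × Int) × Int :=
  (row.1.foldl (fun d nx => d.insert nx.1 (nx.2, s.2)) s.1, s.2 + row.2 + 10)

def calculate_flow_layout_py_alt (components : List (String × List (String × Int))) (container_size : Int × Int) : List (String × Int × Int) :=
  let st := (PySem.Dict.ofList components).items.foldl (pvStepB container_size.1)
    ([], [], 10, 0)
  ((st.1 ++ [(st.2.1, st.2.2.2)]).foldl pvEmit (PySem.Dict.empty, 10)).1.items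

-- ===== PRECONDITION & SPEC =====
def Spec_calculate_flow_layout_py (components : List (String × List (String × Int))) (container_size : Int × Int) (out : List (String × Int × Int)) : Prop := out = calculate_flow_layout_py_alt components container_size
instance (components : List (String × List (String × Int))) (container_size : Int × Int) (out : List (String × Int × Int)) : Decidable (Spec_calculate_flow_layout_py components container_size out) := by unfold Spec_calculate_flow_layout_py; infer_instance

-- ===== CLAIM (what is proved, stated in full; the proofs are below) =====
def Claim_equal_calculate_flow_layout_py : Prop := ∀ (components : List (String × List (String × Int))) (container_size : Int × Int), Dom_calculate_flow_layout_py components container_size → Spec_calculate_flow_layout_py components container_size (calculate_flow_layout_py components container_size)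

-- ===== LEMMAS AND PROOFS =====

-- Invariant: A's fold from the state that B's mid-state (rows, cur, cx, ch) denotes
-- (dict = rows emitted then cur at the current row's y; y = running y after rows)
-- ends in the dict B obtains by finishing pass 1 and emitting all closed rows plus the open one.
lemma pv_main (cw : Int) (L : List (String × List (String × Int))) :
    ∀ (rows : List (List (String × Int) × Int)) (cur : List (String × Int)) (cx ch : Int),
    (L.foldl (pvStepA cw)
      ((pvEmit (rows.foldl pvEmit (PySem.Dict.empty, 10)) (cur, ch)).1, cx,
        (rows.foldl pvEmit (PySem.Dict.empty, 10)).2, ch)).1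
    = (((L.foldl (pvStepB cw) (rows, cur, cx, ch)).1
        ++ [((L.foldl (pvStepB cw) (rows, cur, cx, ch)).2.1,
             (L.foldl (pvStepB cw) (rows, cur, cx, ch)).2.2.2)]).foldl pvEmit
        (PySem.Dict.empty, 10)).1 := by
  induction L with
  | nil =>
    intro rows cur cx ch
    simp [List.foldl_append, pvEmit]
  | cons nc L ih =>
    intro rows cur cx ch
    by_cases hw : cx + (PySem.Dict.ofList nc.2).getD "width" 100 > cw - 10
    · have h1 : List.foldl (pvStepB cw) (rows, cur, cx, ch) (nc :: L)
          = List.foldl (pvStepB cw)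
              (rows ++ [(cur, ch)], [(nc.1, 10)],
                10 + (PySem.Dict.ofList nc.2).getD "width" 100 + 10,
                max 0 ((PySem.Dict.ofList nc.2).getD "height" 100)) L := by
        simp only [List.foldl_cons, pvStepB, hw, if_pos]
        rfl
      have h2 := ih (rows ++ [(cur, ch)]) [(nc.1, 10)]
          (10 + (PySem.Dict.ofList nc.2).getD "width" 100 + 10)
          (max 0 ((PySem.Dict.ofList nc.2).getD "height" 100))
      rw [List.foldl_cons, pvStepA]
      simp only [hw, if_pos]
      rw [h1]
      rw [← h2]
      simp [List.foldl_append, pvEmit]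
    · have h1 : List.foldl (pvStepB cw) (rows, cur, cx, ch) (nc :: L)
          = List.foldl (pvStepB cw)
              (rows, cur ++ [(nc.1, cx)],
                cx + (PySem.Dict.ofList nc.2).getD "width" 100 + 10,
                max ch ((PySem.Dict.ofList nc.2).getD "height" 100)) L := by
        simp only [List.foldl_cons, pvStepB, hw, if_false]
      have h2 := ih rows (cur ++ [(nc.1, cx)])
          (cx + (PySem.Dict.ofList nc.2).getD "width" 100 + 10)
          (max ch ((PySem.Dict.ofList nc.2).getD "height" 100))
      rw [List.foldl_cons, pvStepA]
      simp only [hw, if_false]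
      rw [h1, ← h2]
      simp [pvEmit, List.foldl_append]

-- ===== VERDICT (by name: the statement is the Claim_ definition above) =====
theorem calculate_flow_layout_py_spec : Claim_equal_calculate_flow_layout_py := by
  intro components container_size _
  unfold Spec_calculate_flow_layout_py calculate_flow_layout_py calculate_flow_layout_py_alt
  have h := pv_main container_size.1 (PySem.Dict.ofList components).items [] [] 10 0
  simp only [List.foldl_nil] at h
  simp only [pvEmit, List.foldl_nil] at h
  rw [h]
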